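-- pv_equiv track=rewrite | github.com/angur001/AOC-2024 | DAY22/day22_2.py | create_sequence_dictionary
-- ===== SOURCE A (Python) =====
-- from typing import List, Dict, Tuple
--
-- def get_differences(numbers: List[int]) -> List[int]:
--     return [numbers[i+1] - numbers[i] for i in range(len(numbers)-1)]
--
-- def create_sequence_dictionary(numbers: List[int], sequence_length: int = 4) -> Dict[Tuple[int, ...], int]:
--     sequence_dict = {}
--     differences = get_differences(numbers)
--
--     for i in range(len(differences) - sequence_length + 1):
--
--         diff_sequence = tuple(differences[i:i + sequence_length])
--         next_number = numbers[i + sequence_length]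
--
--         if diff_sequence not in sequence_dict:
--             sequence_dict[diff_sequence] = next_number
--
--
--
--     return sequence_dict
-- ===== SOURCE B (Python) =====
-- def create_sequence_dictionary(numbers, sequence_length=4):
--     # Single streaming pass: maintain the sliding window of differences
--     # incrementally instead of precomputing the difference list and slicing.
--     sequence_dict = {}
--     window = ()
--     prev = None
--     for x in numbers:
--         if prev is not None:
--             window += (x - prev,)
--             if len(window) > sequence_length:
--                 window = window[1:]
--             if len(window) == sequence_length:
--                 sequence_dict.setdefault(window, x)
--         prev = x
--     return sequence_dict
-- ===== Notes on version B (the rewrite author's own statement) =====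
-- stated objective: alternative
-- what changed: B replaces A's precomputed difference list plus index-range loop with slice keys by a single streaming pass over the numbers that maintains the sliding difference window incrementally and records first-seen windows with setdefault.
-- outside the precondition, e.g. on create_sequence_dictionary([5], 0): A returns {(): 5}, B returns {}; on create_sequence_dictionary([1, 2, 3], -1): A returns {(1,): 3, (): 1}, B returns {}
import Mathlib
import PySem

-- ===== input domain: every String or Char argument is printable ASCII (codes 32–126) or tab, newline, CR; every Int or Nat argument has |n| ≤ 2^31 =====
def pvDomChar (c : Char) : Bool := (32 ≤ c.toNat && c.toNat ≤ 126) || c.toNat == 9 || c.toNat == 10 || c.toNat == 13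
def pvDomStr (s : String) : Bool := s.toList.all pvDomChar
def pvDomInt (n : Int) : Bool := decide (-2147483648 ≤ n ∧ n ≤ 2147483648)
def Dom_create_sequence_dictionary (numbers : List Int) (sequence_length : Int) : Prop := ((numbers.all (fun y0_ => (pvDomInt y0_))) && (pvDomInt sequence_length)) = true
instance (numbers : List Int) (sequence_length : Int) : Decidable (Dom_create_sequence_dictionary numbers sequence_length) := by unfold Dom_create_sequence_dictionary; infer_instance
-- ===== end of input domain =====

-- B is a single streaming pass maintaining the sliding difference window incrementally
-- (alternative decomposition; same asymptotic cost as A).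

-- ===== PORT A =====
def get_differences (numbers : List Int) : List Int :=
  (PySem.List.pyRange 0 ((numbers.length : Int) - 1) 1).map
    (fun i => PySem.List.pyGetD numbers (i + 1) 0 - PySem.List.pyGetD numbers i 0)

def create_sequence_dictionary (numbers : List Int) (sequence_length : Int) : List (List Int × Int) :=
  let differences := get_differences numbers
  ((PySem.List.pyRange 0 ((differences.length : Int) - sequence_length + 1) 1).foldl
    (fun (d : PySem.Dict (List Int) Int) i =>
      let diff_sequence := PySem.List.slice differences (some i) (some (i + sequence_length))
      let next_number := PySem.List.pyGetD numbers (i + sequence_length) 0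
      if d.contains diff_sequence = false then d.insert diff_sequence next_number else d)
    PySem.Dict.empty).items

-- ===== PORT B =====
-- loop body of Source B's single for-loop (the match on prev is Python's 'if prev is not None')
def pvStepB (sequence_length : Int)
    (st : PySem.Dict (List Int) Int × List Int × Option Int) (x : Int) :
    PySem.Dict (List Int) Int × List Int × Option Int :=
  match st.2.2 with
  | none => (st.1, st.2.1, some x)
  | some p =>
    let window := st.2.1 ++ [x - p]
    let window := if (window.length : Int) > sequence_length
                  then PySem.List.slice window (some 1) none else window
    if (window.length : Int) = sequence_length
    then (st.1.setdefault window x, window, some x)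
    else (st.1, window, some x)

def create_sequence_dictionary_alt (numbers : List Int) (sequence_length : Int) : List (List Int × Int) :=
  ((numbers.foldl (pvStepB sequence_length) (PySem.Dict.empty, [], none)).1).items

-- ===== PRECONDITION & SPEC =====
-- Pre_ excludes sequence_length < 1: there A's returned values come from empty-slice keys
-- and negative-index wraparound (and A raises IndexError on empty numbers or very negative
-- lengths); B returns {} on all such inputs.
def Pre_create_sequence_dictionary (numbers : List Int) (sequence_length : Int) : Prop :=
  1 ≤ sequence_length
instance (numbers : List Int) (sequence_length : Int) : Decidable (Pre_create_sequence_dictionary numbers sequence_length) := by unfold Pre_create_sequence_dictionary; infer_instance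

def pvWitness_create_sequence_dictionary : List Int × Int := ([1, 3, 2, 6, 5, 9, 8], 4)

def Spec_create_sequence_dictionary (numbers : List Int) (sequence_length : Int) (out : List (List Int × Int)) : Prop := out = create_sequence_dictionary_alt numbers sequence_length
instance (numbers : List Int) (sequence_length : Int) (out : List (List Int × Int)) : Decidable (Spec_create_sequence_dictionary numbers sequence_length out) := by unfold Spec_create_sequence_dictionary; infer_instance

-- ===== CLAIM (what is proved, stated in full; the proofs are below) =====
def Claim_equal_create_sequence_dictionary : Prop := ∀ (numbers : List Int) (sequence_length : Int), Dom_create_sequence_dictionary numbers sequence_length → Pre_create_sequence_dictionary numbers sequence_length → Spec_create_sequence_dictionary numbers sequence_length (create_sequence_dictionary numbers sequence_length)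

-- ===== LEMMAS AND PROOFS =====

-- first-seen insert step, as A's loop body performs it on a (key, value) pair
def pvSdf (d : PySem.Dict (List Int) Int) (kv : List Int × Int) : PySem.Dict (List Int) Int :=
  if d.contains kv.1 = false then d.insert kv.1 kv.2 else d

lemma pvSdf_eq_setdefault (d : PySem.Dict (List Int) Int) (kv : List Int × Int) :
    pvSdf d kv = d.setdefault kv.1 kv.2 := by
  by_cases h : d.contains kv.1
  · simp [pvSdf, h, PySem.Dict.setdefault_of_contains d kv.2 h]
  · simp only [Bool.not_eq_true] at h
    simp [pvSdf, h, PySem.Dict.setdefault_of_not_contains d kv.2 h]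

-- all length-M contiguous windows of ds, in order (for 1 ≤ M)
def pvSw (M : Nat) : List Int → List (List Int)
  | [] => []
  | d :: ds => if ds.length + 1 < M then [] else (d :: ds).take M :: pvSw M ds

lemma pvSw_length (M : Nat) (hM : 1 ≤ M) (ds : List Int) :
    (pvSw M ds).length = ds.length + 1 - M := by
  induction ds with
  | nil => simp [pvSw]; omega
  | cons d ds ih =>
    simp only [pvSw]
    split_ifs with h
    · simp; omega
    · simp [ih]; omega

lemma pvSw_getElem (M : Nat) (hM : 1 ≤ M) (ds : List Int) (k : Nat)
    (hk : k < (pvSw M ds).length) : (pvSw M ds)[k] = (ds.drop k).take M := by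
  induction ds generalizing k with
  | nil => simp [pvSw] at hk
  | cons d ds ih =>
    simp only [pvSw] at hk ⊢
    split_ifs at hk ⊢ with h
    · simp at hk
    · cases k with
      | zero => simp
      | succ k => simpa using ih k (by simpa using hk)

lemma pvSw_cons_of_le (M : Nat) (hM : 1 ≤ M) (ys : List Int) (h : M ≤ ys.length) :
    pvSw M ys = ys.take M :: pvSw M ys.tail := by
  cases ys with
  | nil => simp at h; omega
  | cons y ys => simp only [pvSw, List.tail_cons]; rw [if_neg (by simp at h ⊢; omega)]

-- the difference stream of (p :: xs)
def pvDiffsOf (p : Int) : List Int → List Int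
  | [] => []
  | x :: xs => (x - p) :: pvDiffsOf x xs

lemma pvDiffsOf_length (p : Int) (xs : List Int) : (pvDiffsOf p xs).length = xs.length := by
  induction xs generalizing p with
  | nil => rfl
  | cons x xs ih => simp [pvDiffsOf, ih]

lemma pvDiffsOf_getElem (p : Int) (xs : List Int) (k : Nat) (hk : k < xs.length) :
    (pvDiffsOf p xs)[k]'(by rw [pvDiffsOf_length]; exact hk) =
      (p :: xs)[k + 1]'(by simp; omega) - (p :: xs)[k]'(by simp; omega) := by
  induction xs generalizing p k with
  | nil => simp at hk
  | cons x xs ih =>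
    cases k with
    | zero => simp [pvDiffsOf]
    | succ k => simpa [pvDiffsOf] using ih x k (by simpa using hk)

lemma get_differences_cons (x : Int) (xs : List Int) :
    get_differences (x :: xs) = pvDiffsOf x xs := by
  apply List.ext_getElem
  · simp [get_differences, PySem.List.length_pyRange_one, pvDiffsOf_length]
  · intro k h1 h2
    simp only [get_differences, List.getElem_map, PySem.List.getElem_pyRange_one]
    rw [pvDiffsOf_getElem x xs k (by simpa [pvDiffsOf_length] using h2)]
    have hk : k < xs.length := by simpa [pvDiffsOf_length] using h2
    have e1 : (0 : Int) + k + 1 = ((k + 1 : Nat) : Int) := by push_cast; ring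
    have e2 : (0 : Int) + k = ((k : Nat) : Int) := by push_cast; ring
    rw [e1, e2, PySem.List.pyGetD_natCast, PySem.List.pyGetD_natCast]
    have hA : k + 1 < (x :: xs).length := by simp; omega
    have hB : k < (x :: xs).length := by simp; omega
    rw [List.getD_eq_getElem _ _ hA, List.getD_eq_getElem _ _ hB]

-- the (window, value) pairs B's loop feeds to setdefault, from window w and previous p
def pvWlist (M : Nat) (w : List Int) (p : Int) : List Int → List (List Int × Int)
  | [] => []
  | x :: xs =>
    let w1 := w ++ [x - p]
    let w2 := if M < w1.length then w1.drop 1 else w1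
    (if w2.length = M then [(w2, x)] else []) ++ pvWlist M w2 x xs

lemma foldB_eq (L : Int) (M : Nat) (hL : L = (M : Int)) (xs : List Int) :
    ∀ (d : PySem.Dict (List Int) Int) (w : List Int) (p : Int),
    (xs.foldl (pvStepB L) (d, w, some p)).1 = (pvWlist M w p xs).foldl pvSdf d := by
  induction xs with
  | nil => intro d w p; simp [pvWlist]
  | cons x xs ih =>
    intro d w p
    have hcond : ((if ((w ++ [x - p]).length : Int) > L
        then PySem.List.slice (w ++ [x - p]) (some 1) none else w ++ [x - p]))
        = (if M < (w ++ [x - p]).length then (w ++ [x - p]).drop 1 else w ++ [x - p]) := by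
      rw [PySem.List.slice_from_one, ← List.drop_one]
      subst hL
      by_cases h : M < (w ++ [x - p]).length
      · rw [if_pos (by exact_mod_cast h), if_pos h]
      · rw [if_neg (by exact_mod_cast h), if_neg h]
    simp only [List.foldl_cons, pvStepB, pvWlist]
    rw [hcond]
    set w2 := if M < (w ++ [x - p]).length then (w ++ [x - p]).drop 1 else w ++ [x - p] with hw2
    by_cases hfull : w2.length = M
    · rw [if_pos (by subst hL; exact_mod_cast hfull), if_pos hfull]
      simp only [List.foldl_append, List.foldl_cons, List.foldl_nil]
      rw [ih, pvSdf_eq_setdefault]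
    · rw [if_neg (by subst hL; exact_mod_cast hfull), if_neg hfull]
      simp only [List.nil_append]
      exact ih d w2 x

lemma pvWlist_slide (M : Nat) (hM : 1 ≤ M) (xs : List Int) :
    ∀ (w : List Int) (p : Int), w.length = M →
    pvWlist M w p xs = (pvSw M ((w ++ pvDiffsOf p xs).drop 1)).zip xs := by
  induction xs with
  | nil =>
    intro w p hw
    simp [pvWlist]
  | cons x xs ih =>
    intro w p hw
    have hne : M < (w ++ [x - p]).length := by simp [hw]
    have hdrop : (w ++ [x - p]).drop 1 = w.drop 1 ++ [x - p] :=
      List.drop_append_of_le_length (by omega)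
    have hlen2 : ((w ++ [x - p]).drop 1).length = M := by simp [hw]
    simp only [pvWlist, if_pos hne, if_pos hlen2]
    set w2 := (w ++ [x - p]).drop 1 with hw2def
    rw [ih w2 x hlen2]
    -- RHS
    have hfull : (w ++ pvDiffsOf p (x :: xs)).drop 1 = w2 ++ pvDiffsOf x xs := by
      show (w ++ ((x - p) :: pvDiffsOf x xs)).drop 1 = _
      rw [List.drop_append_of_le_length (by omega), hw2def,
        List.drop_append_of_le_length (by omega)]
      simp
    rw [hfull]
    have hlen3 : M ≤ (w2 ++ pvDiffsOf x xs).length := by simp [hlen2]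
    rw [pvSw_cons_of_le M hM _ hlen3]
    have htake : (w2 ++ pvDiffsOf x xs).take M = w2 := by
      rw [← hlen2, List.take_left]
    have htail : (w2 ++ pvDiffsOf x xs).drop 1 = (w2 ++ pvDiffsOf x xs).tail :=
      List.drop_one
    rw [htake, htail, List.zip_cons_cons]
    simp

lemma pvWlist_fill (M : Nat) (hM : 1 ≤ M) (xs : List Int) :
    ∀ (w : List Int) (p : Int), w.length < M →
    pvWlist M w p xs = (pvSw M (w ++ pvDiffsOf p xs)).zip (xs.drop (M - 1 - w.length)) := by
  induction xs with
  | nil => intro w p hw; simp [pvWlist]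
  | cons x xs ih =>
    intro w p hw
    have hnotlt : ¬ (M < (w ++ [x - p]).length) := by simp; omega
    have hw1 : (w ++ [x - p]).length = w.length + 1 := by simp
    simp only [pvWlist, if_neg hnotlt]
    have hassoc : w ++ pvDiffsOf p (x :: xs) = (w ++ [x - p]) ++ pvDiffsOf x xs := by
      show w ++ ((x - p) :: pvDiffsOf x xs) = _
      simp
    by_cases hfull : (w ++ [x - p]).length = M
    · rw [if_pos hfull]
      rw [pvWlist_slide M hM xs _ x hfull]
      have hd0 : M - 1 - w.length = 0 := by omega
      rw [hassoc, hd0, List.drop_zero]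
      have hlen3 : M ≤ ((w ++ [x - p]) ++ pvDiffsOf x xs).length := by simp at hfull ⊢; omega
      rw [pvSw_cons_of_le M hM _ hlen3]
      have htake : ((w ++ [x - p]) ++ pvDiffsOf x xs).take M = w ++ [x - p] := by
        rw [← hfull, List.take_left]
      rw [← List.drop_one, htake, List.zip_cons_cons]
      simp
    · rw [if_neg hfull]
      have hlt : (w ++ [x - p]).length < M := by omega
      rw [List.nil_append, ih (w ++ [x - p]) x hlt, hassoc]
      have : M - 1 - w.length = (M - 1 - (w ++ [x - p]).length) + 1 := by
        simp at hfull ⊢; omega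
      rw [this, List.drop_succ_cons]

-- A's loop, rephrased as a fold of pvSdf over explicit (window, value) pairs
lemma opsA_eq (numbers : List Int) (L : Int) (M : Nat) (hL : L = (M : Int)) (hM : 1 ≤ M) :
    (PySem.List.pyRange 0 (((get_differences numbers).length : Int) - L + 1) 1).map
      (fun i => (PySem.List.slice (get_differences numbers) (some i) (some (i + L)),
                 PySem.List.pyGetD numbers (i + L) 0))
    = (pvSw M (get_differences numbers)).zip (numbers.drop M) := by
  have hdl : (get_differences numbers).length = numbers.length - 1 := by
    simp [get_differences, PySem.List.length_pyRange_one]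
  apply List.ext_getElem
  · rw [List.length_map, PySem.List.length_pyRange_one, List.length_zip,
      pvSw_length M hM, List.length_drop, hdl]
    subst hL; omega
  · intro k h1 h2
    rw [List.length_map, PySem.List.length_pyRange_one] at h1
    have hk : (k : Int) < ((get_differences numbers).length : Int) - L + 1 := by omega
    simp only [List.getElem_map, PySem.List.getElem_pyRange_one, List.getElem_zip]
    have e0 : (0 : Int) + k = ((k : Nat) : Int) := by push_cast; ring
    rw [e0]
    subst hL
    have hslice : PySem.List.slice (get_differences numbers) (some ((k : Nat) : Int))
        (some (((k : Nat) : Int) + (M : Int))) = ((get_differences numbers).drop k).take M :=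
      PySem.List.slice_natCast_add (get_differences numbers) k M
    rw [hslice]
    have hswlen : k < (pvSw M (get_differences numbers)).length := by
      rw [pvSw_length M hM]; omega
    rw [pvSw_getElem M hM _ k hswlen]
    have hsum : ((k : Nat) : Int) + (M : Int) = ((M + k : Nat) : Int) := by push_cast; ring
    rw [hsum, PySem.List.pyGetD_natCast]
    have hkM : M + k < numbers.length := by omega
    rw [List.getD_eq_getElem _ _ hkM, List.getElem_drop]

-- the two dicts agree (as dicts, hence as item lists)
lemma main_eq (numbers : List Int) (L : Int) (hPre : 1 ≤ L) :
    create_sequence_dictionary numbers L = create_sequence_dictionary_alt numbers L := by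
  set M := L.toNat with hMdef
  have hL : L = (M : Int) := by omega
  have hM : 1 ≤ M := by omega
  -- A side: fold over mapped pairs
  have hA : (PySem.List.pyRange 0 (((get_differences numbers).length : Int) - L + 1) 1).foldl
      (fun (d : PySem.Dict (List Int) Int) i =>
        if d.contains (PySem.List.slice (get_differences numbers) (some i) (some (i + L))) = false
        then d.insert (PySem.List.slice (get_differences numbers) (some i) (some (i + L)))
          (PySem.List.pyGetD numbers (i + L) 0)
        else d)
      PySem.Dict.empty
      = ((pvSw M (get_differences numbers)).zip (numbers.drop M)).foldl pvSdf PySem.Dict.empty := by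
    rw [← opsA_eq numbers L M hL hM, List.foldl_map]
    rfl
  show ((PySem.List.pyRange 0 (((get_differences numbers).length : Int) - L + 1) 1).foldl
      (fun (d : PySem.Dict (List Int) Int) i =>
        if d.contains (PySem.List.slice (get_differences numbers) (some i) (some (i + L))) = false
        then d.insert (PySem.List.slice (get_differences numbers) (some i) (some (i + L)))
          (PySem.List.pyGetD numbers (i + L) 0)
        else d)
      PySem.Dict.empty).items
    = ((numbers.foldl (pvStepB L) (PySem.Dict.empty, [], none)).1).items
  rw [hA]
  cases numbers with
  | nil => simp
  | cons x xs =>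
    have hstep0 : pvStepB L (PySem.Dict.empty, [], none) x = (PySem.Dict.empty, [], some x) := rfl
    rw [List.foldl_cons, hstep0, foldB_eq L M hL xs PySem.Dict.empty [] x,
      pvWlist_fill M hM xs [] x (by simpa using hM), get_differences_cons]
    simp only [List.length_nil, Nat.sub_zero]
    rw [show (x :: xs).drop M = xs.drop (M - 1) from by
      conv_lhs => rw [show M = (M - 1) + 1 from by omega]
      rw [List.drop_succ_cons]]
    simp

-- ===== VERDICT (by name: the statement is the Claim_ definition above) =====
theorem create_sequence_dictionary_spec : Claim_equal_create_sequence_dictionary := by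
  intro numbers sequence_length _ hPre
  unfold Spec_create_sequence_dictionary
  exact main_eq numbers sequence_length hPre
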